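-- pv_equiv track=rewrite | github.com/jwasinger/py-evmmax | limbs.py | limbs_add
-- ===== SOURCE A (Python) =====
-- def limbs_add(x, y, base) -> (int, [int]):
--     assert len(x) == len(y), "num_limbs must be equal"
--
--     res = [0] * len(x)
--
--     c = 0
--     for i, (x, y) in enumerate(zip(x, y)):
--         res[i] = (x + y + c) % base
--         c =  (x + y + c) // base
--
--     return c, res
-- ===== SOURCE B (Python) =====
-- def limbs_add(x, y, base) -> (int, [int]):
--     assert len(x) == len(y), "num_limbs must be equal"
--     # Horner: s = sum((xi+yi) * base**i)
--     s = 0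
--     for xi, yi in zip(reversed(x), reversed(y)):
--         s = s * base + xi + yi
--     # re-decompose into len(x) base-`base` digits
--     res = []
--     for _ in x:
--         res.append(s % base)
--         s //= base
--     return s, res
-- ===== Notes on version B (the rewrite author's own statement) =====
-- stated objective: alternative
-- what changed: Replaces the carry-propagation loop with a convert/add/re-decompose strategy: fold both operands into one big integer by Horner's rule, then peel off len(x) digits with divmod; the carry variable disappears.
import Mathlib
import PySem

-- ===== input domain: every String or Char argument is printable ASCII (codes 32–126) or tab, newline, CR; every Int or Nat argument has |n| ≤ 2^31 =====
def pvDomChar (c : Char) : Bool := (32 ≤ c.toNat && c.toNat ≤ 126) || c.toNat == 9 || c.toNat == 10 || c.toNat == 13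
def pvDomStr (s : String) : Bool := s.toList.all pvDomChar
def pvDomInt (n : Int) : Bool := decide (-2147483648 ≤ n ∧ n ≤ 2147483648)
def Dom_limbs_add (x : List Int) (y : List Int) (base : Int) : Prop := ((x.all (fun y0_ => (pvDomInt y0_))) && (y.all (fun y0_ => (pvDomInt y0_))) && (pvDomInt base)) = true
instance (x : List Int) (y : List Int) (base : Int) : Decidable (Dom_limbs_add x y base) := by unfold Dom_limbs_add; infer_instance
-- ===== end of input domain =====

-- B: fold the two operands into one integer by Horner's rule, add, then re-decompose
-- with divmod — a different decomposition of the task (not faster), vs A's carry loop.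

-- ===== PORT A =====
-- the `for i, (x, y) in enumerate(zip(x, y))` carry loop; res is filled left to right
def limbs_add.loop (base : Int) : List (Int × Int) → Int → Int × List Int
  | [], c => (c, [])
  | p :: t, c =>
    let r := PySem.Int.mod (p.1 + p.2 + c) base
    let rest := limbs_add.loop base t (PySem.Int.floordiv (p.1 + p.2 + c) base)
    (rest.1, r :: rest.2)

def limbs_add (x : List Int) (y : List Int) (base : Int) : Int × List Int :=
  -- assert len(x) == len(y): raising inputs are excluded by Pre_limbs_add
  limbs_add.loop base (x.zip y) 0

-- ===== PORT B =====
-- s = s * base + xi + yi over zip(reversed(x), reversed(y))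
def limbs_add_alt.toInt (base : Int) : List (Int × Int) → Int → Int
  | [], s => s
  | p :: t, s => limbs_add_alt.toInt base t (s * base + p.1 + p.2)

-- for _ in x: res.append(s % base); s //= base
def limbs_add_alt.decomp (base : Int) : List Int → Int → Int × List Int
  | [], s => (s, [])
  | _ :: t, s =>
    let rest := limbs_add_alt.decomp base t (PySem.Int.floordiv s base)
    (rest.1, PySem.Int.mod s base :: rest.2)

def limbs_add_alt (x : List Int) (y : List Int) (base : Int) : Int × List Int :=
  limbs_add_alt.decomp base x (limbs_add_alt.toInt base (x.reverse.zip y.reverse) 0)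

-- ===== PRECONDITION & SPEC =====
-- Pre_ excludes exactly the raising inputs: unequal lengths (AssertionError in both A
-- and B) and base = 0 with nonempty x (ZeroDivisionError in both A and B).
def Pre_limbs_add (x : List Int) (y : List Int) (base : Int) : Prop :=
  x.length = y.length ∧ (x = [] ∨ base ≠ 0)
instance (x : List Int) (y : List Int) (base : Int) : Decidable (Pre_limbs_add x y base) := by unfold Pre_limbs_add; infer_instance

def pvWitness_limbs_add : List Int × List Int × Int := ([5, 7], [9, 3], 10)

def Spec_limbs_add (x : List Int) (y : List Int) (base : Int) (out : Int × List Int) : Prop := out = limbs_add_alt x y base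
instance (x : List Int) (y : List Int) (base : Int) (out : Int × List Int) : Decidable (Spec_limbs_add x y base out) := by unfold Spec_limbs_add; infer_instance

-- ===== CLAIM (what is proved, stated in full; the proofs are below) =====
def Claim_equal_limbs_add : Prop := ∀ (x : List Int) (y : List Int) (base : Int), Dom_limbs_add x y base → Pre_limbs_add x y base → Spec_limbs_add x y base (limbs_add x y base)

-- ===== LEMMAS AND PROOFS =====

-- the positional value of a limb list: Σ (p.1 + p.2) * base^i
def pvVal (base : Int) (z : List (Int × Int)) : Int :=
  z.foldr (fun p s => s * base + p.1 + p.2) 0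

lemma toInt_eq_foldl (base : Int) (z : List (Int × Int)) (s : Int) :
    limbs_add_alt.toInt base z s = z.foldl (fun s p => s * base + p.1 + p.2) s := by
  induction z generalizing s with
  | nil => rfl
  | cons p t ih => simp [limbs_add_alt.toInt, ih]

lemma toInt_rev (base : Int) (z : List (Int × Int)) :
    limbs_add_alt.toInt base z.reverse 0 = pvVal base z := by
  rw [toInt_eq_foldl, List.foldl_reverse, pvVal]

lemma zip_rev (x y : List Int) (h : x.length = y.length) :
    x.reverse.zip y.reverse = (x.zip y).reverse := by
  induction x generalizing y with
  | nil => simp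
  | cons a t ih =>
    match y with
    | [] => simp at h
    | b :: u =>
      simp at h
      simp only [List.reverse_cons]
      rw [List.zip_append (by simpa using h), ih u h]
      simp

lemma fmod_key (a k b : Int) : PySem.Int.mod (k * b + a) b = PySem.Int.mod a b := by
  simp only [PySem.Int.mod]
  have h : k * b + a = a + b * k := by ring
  rw [h, Int.add_mul_fmod_self_left]

lemma fdiv_key (a k b : Int) (hb : b ≠ 0) :
    PySem.Int.floordiv (k * b + a) b = k + PySem.Int.floordiv a b := by
  simp only [PySem.Int.floordiv]
  have h : k * b + a = a + k * b := by ring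
  rw [h, Int.add_mul_fdiv_right a k hb, add_comm]

lemma key (base : Int) (hb : base ≠ 0) :
    ∀ (z : List (Int × Int)) (w : List Int) (c : Int), w.length = z.length →
      limbs_add.loop base z c = limbs_add_alt.decomp base w (pvVal base z + c) := by
  intro z
  induction z with
  | nil =>
    intro w c hw
    have : w = [] := List.eq_nil_of_length_eq_zero hw
    subst this
    simp [limbs_add.loop, limbs_add_alt.decomp, pvVal]
  | cons p t ih =>
    intro w c hw
    match w with
    | [] => simp at hw
    | a :: u =>
      simp at hw
      have hval : pvVal base (p :: t) + c = pvVal base t * base + (p.1 + p.2 + c) := by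
        simp [pvVal]; ring
      simp only [limbs_add.loop, limbs_add_alt.decomp, hval]
      rw [fmod_key, fdiv_key _ _ _ hb, ih u _ hw]

theorem limbs_add_spec : Claim_equal_limbs_add := by
  intro x y base _ hpre
  obtain ⟨hlen, hz⟩ := hpre
  unfold Spec_limbs_add limbs_add limbs_add_alt
  rw [zip_rev x y hlen, toInt_rev]
  rcases hz with hx | hb
  · subst hx
    have : y = [] := by simpa using hlen.symm
    subst this
    rfl
  · have := key base hb (x.zip y) x 0 ?_
    · rw [this]; ring_nf
    · simp [List.length_zip, hlen]
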